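-- pv_equiv track=rewrite | github.com/aminnj/matplottery | matplottery/braille.py | pair_to_charcodes
-- ===== SOURCE A (Python) =====
-- def pair_to_charcodes(ndotsL,ndotsR,charheight):
--     """
--     takes pair of dots for left and right columns and converts
--     into list of character codes to draw, so
--     0 0 -> [(0,0)]
--     4 4 -> [(4,4)]
--     5 4 -> [(4,4), (1,0)]
--     7 9 -> [(4,4), (3,4), (0,1)]
--     9 1 -> [(4,1), (4,0), (1,0)]
--     For example, 9 dots on the left and 1 dot on the right
--     means draw a character with 4 dots on the left, 1 on right
--     then 4 dots on left, 0 on right, and then char with 1 dot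
--     on left and 0 on right
--     """
--     pairs_out = []
--     while ndotsL > 0 or ndotsR > 0:
--         takeL = min(ndotsL,charheight)
--         takeR = min(ndotsR,charheight)
--         pairs_out.append( (takeL,takeR) )
--         ndotsL -= takeL
--         ndotsR -= takeR
--     if not pairs_out:
--         pairs_out.append( (0,0) )
--     return pairs_out
-- ===== SOURCE B (Python) =====
-- def pair_to_charcodes(ndotsL, ndotsR, charheight):
--     # Indexed closed-form pass: compute the number of characters needed,
--     # then emit chunk i directly, instead of A's subtract-until-zero loop.
--     nchars = max(-(-ndotsL // charheight) if ndotsL > 0 else 0,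
--                  -(-ndotsR // charheight) if ndotsR > 0 else 0)
--     if nchars == 0:
--         return [(0, 0)]
--     def chunk(n, i):
--         return min(charheight, max(n - i * charheight, 0))
--     return [(chunk(ndotsL, i), chunk(ndotsR, i)) for i in range(nchars)]
-- ===== Notes on version B (the rewrite author's own statement) =====
-- stated objective: alternative
-- what changed: A's stateful subtract-until-zero while-loop is replaced by computing the number of characters up front with ceiling division and emitting each chunk directly by an indexed closed-form formula min(charheight, max(n - i*charheight, 0)).
-- outside the precondition, e.g. on pair_to_charcodes(-3, 5, 4): A returns [(-3, 4), (0, 1)], B returns [(0, 4), (0, 1)]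
import Mathlib
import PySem

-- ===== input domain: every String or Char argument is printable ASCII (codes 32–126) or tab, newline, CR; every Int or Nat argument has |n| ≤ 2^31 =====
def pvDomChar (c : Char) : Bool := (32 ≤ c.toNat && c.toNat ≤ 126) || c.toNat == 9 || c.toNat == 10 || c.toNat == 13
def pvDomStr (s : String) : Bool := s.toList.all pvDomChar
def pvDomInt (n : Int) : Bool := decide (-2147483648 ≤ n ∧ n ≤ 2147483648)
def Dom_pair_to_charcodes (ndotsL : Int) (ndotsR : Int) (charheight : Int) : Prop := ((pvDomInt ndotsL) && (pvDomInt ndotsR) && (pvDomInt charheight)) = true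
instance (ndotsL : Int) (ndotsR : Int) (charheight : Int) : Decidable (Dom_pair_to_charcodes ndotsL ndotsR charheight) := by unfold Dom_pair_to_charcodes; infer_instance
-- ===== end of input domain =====

-- B replaces A's stateful subtract-until-zero loop by a precomputed character count
-- and a direct indexed chunk formula (objective: alternative decomposition).

-- ===== PORT A =====
-- fuel makes A's while-loop total; inside Pre_ every iteration removes at least one
-- dot, so ndotsL.toNat + ndotsR.toNat steps always suffice to reach the exit test.
def pairLoop (fuel : Nat) (ndotsL ndotsR charheight : Int) (acc : List (Int × Int)) : List (Int × Int) :=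
  match fuel with
  | 0 => acc
  | fuel + 1 =>
    if ndotsL > 0 ∨ ndotsR > 0 then
      let takeL := min ndotsL charheight
      let takeR := min ndotsR charheight
      pairLoop fuel (ndotsL - takeL) (ndotsR - takeR) charheight (acc ++ [(takeL, takeR)])
    else acc

def pair_to_charcodes (ndotsL : Int) (ndotsR : Int) (charheight : Int) : List (Int × Int) :=
  let pairs_out := pairLoop (ndotsL.toNat + ndotsR.toNat) ndotsL ndotsR charheight []
  if pairs_out = [] then [(0, 0)] else pairs_out

-- ===== PORT B =====
-- -(-n // charheight) if n > 0 else 0  (Python floor division)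
def pvCeilCount (n h : Int) : Int := if n > 0 then -(PySem.Int.floordiv (-n) h) else 0

-- min(charheight, max(n - i*charheight, 0))
def pvChunk (h n i : Int) : Int := min h (max (n - i * h) 0)

def pair_to_charcodes_alt (ndotsL : Int) (ndotsR : Int) (charheight : Int) : List (Int × Int) :=
  let nchars := max (pvCeilCount ndotsL charheight) (pvCeilCount ndotsR charheight)
  if nchars = 0 then [(0, 0)]
  else (PySem.List.pyRange 0 nchars 1).map
    (fun i => (pvChunk charheight ndotsL i, pvChunk charheight ndotsR i))

-- ===== PRECONDITION & SPEC =====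
-- Pre_ restricts to the function's natural domain of non-negative dot counts (with a
-- positive character height whenever a dot is to be drawn): on a negative count paired
-- with a positive one A still returns but leaks the raw negative count into the first
-- character-code pair, an artefact outside the natural domain; on charheight ≤ 0 with a
-- positive count A never returns (infinite loop).
def Pre_pair_to_charcodes (ndotsL : Int) (ndotsR : Int) (charheight : Int) : Prop :=
  (0 ≤ ndotsL ∧ 0 ≤ ndotsR ∧ 1 ≤ charheight) ∨ (ndotsL ≤ 0 ∧ ndotsR ≤ 0)
instance (ndotsL : Int) (ndotsR : Int) (charheight : Int) : Decidable (Pre_pair_to_charcodes ndotsL ndotsR charheight) := by unfold Pre_pair_to_charcodes; infer_instance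

def pvWitness_pair_to_charcodes : Int × Int × Int := (9, 1, 4)

def Spec_pair_to_charcodes (ndotsL : Int) (ndotsR : Int) (charheight : Int) (out : List (Int × Int)) : Prop := out = pair_to_charcodes_alt ndotsL ndotsR charheight
instance (ndotsL : Int) (ndotsR : Int) (charheight : Int) (out : List (Int × Int)) : Decidable (Spec_pair_to_charcodes ndotsL ndotsR charheight out) := by unfold Spec_pair_to_charcodes; infer_instance

-- ===== CLAIM (what is proved, stated in full; the proofs are below) =====
def Claim_equal_pair_to_charcodes : Prop := ∀ (ndotsL : Int) (ndotsR : Int) (charheight : Int), Dom_pair_to_charcodes ndotsL ndotsR charheight → Pre_pair_to_charcodes ndotsL ndotsR charheight → Spec_pair_to_charcodes ndotsL ndotsR charheight (pair_to_charcodes ndotsL ndotsR charheight)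

-- ===== LEMMAS AND PROOFS =====

-- B's output list before the empty-case guard
def mapCore (L R h : Int) : List (Int × Int) :=
  (PySem.List.pyRange 0 (max (pvCeilCount L h) (pvCeilCount R h)) 1).map
    (fun i => (pvChunk h L i, pvChunk h R i))

lemma ceil_bounds (n h : Int) (hh : 0 < h) (hn : 0 < n) :
    (pvCeilCount n h - 1) * h < n ∧ n ≤ pvCeilCount n h * h := by
  have : pvCeilCount n h = -(PySem.Int.floordiv (-n) h) := by
    unfold pvCeilCount; rw [if_pos hn]
  rw [this]
  exact (PySem.Int.neg_floordiv_neg_eq_iff_of_pos hh).mp rfl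

lemma ceil_pos (n h : Int) (hh : 0 < h) (hn : 0 < n) : 1 ≤ pvCeilCount n h := by
  obtain ⟨_, h2⟩ := ceil_bounds n h hh hn
  by_contra hc
  push_neg at hc
  nlinarith

lemma ceil_nonpos (n h : Int) (hn : n ≤ 0) : pvCeilCount n h = 0 := by
  unfold pvCeilCount; rw [if_neg (by omega)]

lemma ceil_sub (n h : Int) (hh : 1 ≤ h) (hn : 0 ≤ n) :
    pvCeilCount (n - min n h) h = max (pvCeilCount n h - 1) 0 := by
  rcases eq_or_lt_of_le hn with h0 | h0
  · have h00 : n = 0 := h0.symm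
    subst h00
    have hm : min (0 : Int) h = 0 := by omega
    rw [hm, ceil_nonpos 0 h le_rfl]
    rw [show (0 : Int) - 0 = 0 from by ring, ceil_nonpos 0 h le_rfl]
    omega
  · obtain ⟨b1, b2⟩ := ceil_bounds n h (by omega) h0
    have hc1 : 1 ≤ pvCeilCount n h := ceil_pos n h (by omega) h0
    by_cases hnh : h ≤ n
    · -- n - min n h = n - h, still governed by the ceiling bounds shifted by one
      have hmin : min n h = h := by omega
      rw [hmin]
      by_cases hpos : 0 < n - h
      · have hgoal : -(PySem.Int.floordiv (-(n - h)) h) = pvCeilCount n h - 1 := by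
          rw [PySem.Int.neg_floordiv_neg_eq_iff_of_pos (by omega)]
          constructor <;> nlinarith
        have hL : pvCeilCount (n - h) h = -(PySem.Int.floordiv (-(n - h)) h) := by
          unfold pvCeilCount; rw [if_pos hpos]
        rw [hL, hgoal]
        omega
      · -- n = h exactly (since h ≤ n and n - h ≤ 0): count was 1, now 0
        have hcc : pvCeilCount n h = 1 := by
          by_contra hne
          have : 2 ≤ pvCeilCount n h := by omega
          nlinarith
        rw [ceil_nonpos _ _ (by omega), hcc]
        omega
    · -- 0 < n < h : one character, count drops from 1 to 0
      have hmin : min n h = n := by omega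
      have hcc : pvCeilCount n h = 1 := by
        by_contra hne
        have : 2 ≤ pvCeilCount n h := by omega
        nlinarith
      rw [hmin, ceil_nonpos _ _ (by omega), hcc]
      omega

lemma chunk_zero (h n : Int) (_hn : 0 ≤ n) : pvChunk h n 0 = min n h := by
  unfold pvChunk; omega

lemma chunk_shift (h n i : Int) (hh : 1 ≤ h) (hn : 0 ≤ n) (hi : 0 ≤ i) :
    pvChunk h (n - min n h) i = pvChunk h n (i + 1) := by
  unfold pvChunk
  have hp : 0 ≤ i * h := mul_nonneg hi (by omega)
  have he : (i + 1) * h = i * h + h := by ring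
  omega

lemma map_pyRange_shift {α : Type} (f : Int → α) (a b : Int) :
    (PySem.List.pyRange (a + 1) (b + 1) 1).map f
      = (PySem.List.pyRange a b 1).map (fun i => f (i + 1)) := by
  rw [PySem.List.pyRange_one, PySem.List.pyRange_one]
  have : (b + 1 - (a + 1)) = b - a := by ring
  rw [this, List.map_map, List.map_map]
  apply List.map_congr_left
  intro k _
  simp only [Function.comp]
  congr 1
  ring

lemma mapCore_cons (L R h : Int) (hh : 1 ≤ h) (hL : 0 ≤ L) (hR : 0 ≤ R)
    (hpos : 0 < L ∨ 0 < R) :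
    mapCore L R h = (min L h, min R h) :: mapCore (L - min L h) (R - min R h) h := by
  have hcL : 0 ≤ pvCeilCount L h := by
    by_cases h' : L ≤ 0
    · rw [ceil_nonpos L h h']
    · exact le_trans (by omega) (ceil_pos L h (by omega) (by omega))
  have hcR : 0 ≤ pvCeilCount R h := by
    by_cases h' : R ≤ 0
    · rw [ceil_nonpos R h h']
    · exact le_trans (by omega) (ceil_pos R h (by omega) (by omega))
  have hc1 : 1 ≤ max (pvCeilCount L h) (pvCeilCount R h) := by
    rcases hpos with h' | h'
    · exact le_max_of_le_left (ceil_pos L h (by omega) h')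
    · exact le_max_of_le_right (ceil_pos R h (by omega) h')
  have hstep : max (pvCeilCount (L - min L h) h) (pvCeilCount (R - min R h) h)
      = max (pvCeilCount L h) (pvCeilCount R h) - 1 := by
    rw [ceil_sub L h hh hL, ceil_sub R h hh hR]
    omega
  unfold mapCore
  rw [hstep]
  set c := max (pvCeilCount L h) (pvCeilCount R h) with hc
  have hsplit : PySem.List.pyRange 0 c 1 = 0 :: PySem.List.pyRange 1 c 1 :=
    PySem.List.pyRange_one_cons (by omega)
  rw [hsplit, List.map_cons, chunk_zero h L hL, chunk_zero h R hR]
  congr 1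
  have hshift := map_pyRange_shift (fun i => (pvChunk h L i, pvChunk h R i)) 0 (c - 1)
  rw [show (0 : Int) + 1 = 1 from by ring, show c - 1 + 1 = c from by ring] at hshift
  rw [hshift]
  apply List.map_congr_left
  intro i hi
  have hi0 : 0 ≤ i := ((PySem.List.mem_pyRange_one).mp hi).1
  rw [chunk_shift h L i hh hL hi0, chunk_shift h R i hh hR hi0]

lemma pairLoop_eq (fuel : Nat) : ∀ (L R h : Int) (acc : List (Int × Int)),
    0 ≤ L → 0 ≤ R → 1 ≤ h → L.toNat + R.toNat ≤ fuel →
    pairLoop fuel L R h acc = acc ++ mapCore L R h := by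
  induction fuel with
  | zero =>
    intro L R h acc hL hR hh hf
    have hL0 : L = 0 := by omega
    have hR0 : R = 0 := by omega
    subst hL0; subst hR0
    unfold pairLoop mapCore
    rw [ceil_nonpos 0 h le_rfl]
    simp [PySem.List.pyRange_one_eq_nil]
  | succ fuel ih =>
    intro L R h acc hL hR hh hf
    unfold pairLoop
    by_cases hcond : L > 0 ∨ R > 0
    · rw [if_pos hcond]
      simp only []
      rw [ih (L - min L h) (R - min R h) h _ (by omega) (by omega) hh (by omega)]
      rw [mapCore_cons L R h hh hL hR (by omega)]
      simp
    · rw [if_neg hcond]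
      push_neg at hcond
      have hL0 : L = 0 := by omega
      have hR0 : R = 0 := by omega
      subst hL0; subst hR0
      unfold mapCore
      rw [ceil_nonpos 0 h le_rfl]
      simp [PySem.List.pyRange_one_eq_nil]

lemma mapCore_ne_nil (L R h : Int) (hc : 1 ≤ max (pvCeilCount L h) (pvCeilCount R h)) :
    mapCore L R h ≠ [] := by
  unfold mapCore
  intro hnil
  have := congrArg List.length hnil
  rw [List.length_map, PySem.List.length_pyRange_one] at this
  simp at this
  omega

-- ===== VERDICT (by name: the statement is the Claim_ definition above) =====
theorem pair_to_charcodes_spec : Claim_equal_pair_to_charcodes := by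
  intro L R h _ hpre
  unfold Spec_pair_to_charcodes pair_to_charcodes pair_to_charcodes_alt
  rcases hpre with ⟨hL, hR, hh⟩ | ⟨hL, hR⟩
  · by_cases hpos : 0 < L ∨ 0 < R
    · have hc1 : 1 ≤ max (pvCeilCount L h) (pvCeilCount R h) := by
        rcases hpos with h' | h'
        · exact le_max_of_le_left (ceil_pos L h (by omega) h')
        · exact le_max_of_le_right (ceil_pos R h (by omega) h')
      rw [pairLoop_eq _ L R h [] hL hR hh le_rfl]
      simp only [List.nil_append]
      rw [if_neg (mapCore_ne_nil L R h hc1), if_neg (by omega)]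
      rfl
    · push_neg at hpos
      have hL0 : L = 0 := by omega
      have hR0 : R = 0 := by omega
      subst hL0; subst hR0
      simp [pairLoop, ceil_nonpos 0 h le_rfl]
  · -- both counts ≤ 0: zero loop iterations on A's side, zero characters on B's
    have hfuel : L.toNat + R.toNat = 0 := by omega
    rw [hfuel]
    simp [pairLoop, ceil_nonpos L h hL, ceil_nonpos R h hR]
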